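-- pv_equiv track=rewrite | github.com/thierryxdp/TCC | problems/804/solution_882.py | filtra_pares
-- ===== SOURCE A (Python) =====
-- def filtra_pares(tup):
--     '''filtra_pares : tuplo -> inteiro
--    recebe tuplo de inteiros e devolve o numero de elementos pares na tupla'''
--     if not (tup):
--         return 0
--
--     par = (tup[0] % 980 == 0)
--
--     if par:
--         return 1 + filtra_pares(tup[1:])
--     else:
--         return filtra_pares(tup[1:])
-- ===== SOURCE B (Python) =====
-- def filtra_pares(tup):
--     count = 0
--     for x in tup:
--         if x % 980 == 0:
--             count += 1
--     return count
-- ===== Notes on version B (the rewrite author's own statement) =====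
-- stated objective: simpler
-- what changed: Replaces the head/tail slicing recursion with a single iterative accumulator loop over the tuple.
import Mathlib
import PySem

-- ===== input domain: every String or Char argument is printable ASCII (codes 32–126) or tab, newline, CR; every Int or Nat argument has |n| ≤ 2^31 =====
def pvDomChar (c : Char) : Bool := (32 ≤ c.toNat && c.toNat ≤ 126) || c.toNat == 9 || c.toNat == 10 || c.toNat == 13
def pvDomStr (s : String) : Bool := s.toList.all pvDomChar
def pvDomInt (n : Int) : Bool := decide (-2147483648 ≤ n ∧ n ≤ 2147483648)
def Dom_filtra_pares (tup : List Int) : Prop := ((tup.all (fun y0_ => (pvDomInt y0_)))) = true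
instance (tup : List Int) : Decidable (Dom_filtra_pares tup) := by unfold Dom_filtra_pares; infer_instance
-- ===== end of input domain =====

-- B replaces A's head/tail slicing recursion by one iterative accumulator pass; return values proved equal.

-- ===== PORT A =====
-- literal port: empty check, head test with Python %, recursion on tup[1:]
def filtra_pares (tup : List Int) : Int :=
  match tup with
  | [] => 0
  | x :: rest =>
    if PySem.Int.mod x 980 = 0 then 1 + filtra_pares rest
    else filtra_pares rest

-- ===== PORT B =====
-- literal port of Source B: fold carrying the count accumulator over the list
def filtra_pares_alt (tup : List Int) : Int :=
  tup.foldl (fun count x => if PySem.Int.mod x 980 = 0 then count + 1 else count) 0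

-- ===== PRECONDITION & SPEC =====
def Spec_filtra_pares (tup : List Int) (out : Int) : Prop := out = filtra_pares_alt tup
instance (tup : List Int) (out : Int) : Decidable (Spec_filtra_pares tup out) := by unfold Spec_filtra_pares; infer_instance

-- ===== CLAIM (what is proved, stated in full; the proofs are below) =====
def Claim_equal_filtra_pares : Prop := ∀ (tup : List Int), Dom_filtra_pares tup → Spec_filtra_pares tup (filtra_pares tup)

-- ===== LEMMAS AND PROOFS =====
lemma filtra_pares_alt_acc (tup : List Int) (c : Int) :
    tup.foldl (fun count x => if PySem.Int.mod x 980 = 0 then count + 1 else count) c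
      = c + filtra_pares tup := by
  induction tup generalizing c with
  | nil => simp [filtra_pares]
  | cons x rest ih =>
    simp only [List.foldl, filtra_pares]
    split_ifs <;> rw [ih] <;> ring

-- ===== VERDICT (by name: the statement is the Claim_ definition above) =====
theorem filtra_pares_spec : Claim_equal_filtra_pares := by
  intro tup _
  unfold Spec_filtra_pares filtra_pares_alt
  rw [filtra_pares_alt_acc]
  ring
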